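-- pv_equiv track=rewrite | github.com/AIQ-Kitware/helm_audit | dev/poc/eee-audit/sweep.py | _extract_exception_class
-- ===== SOURCE A (Python) =====
-- def _extract_exception_class(stderr: str) -> str:
--     """Extract the outermost exception class from a Python traceback."""
--     lines = stderr.strip().splitlines()
--     for line in reversed(lines):
--         stripped = line.strip()
--         if not stripped or stripped.startswith(("File ", " ", "~", "^", ".")):
--             continue
--         if "Error" in stripped or "Exception" in stripped:
--             if ":" in stripped:
--                 exc_part = stripped.split(":")[0].strip()
--                 return exc_part.split(".")[-1]
--             if stripped.split() and (
--                 "Error" in stripped.split()[0] or "Exception" in stripped.split()[0]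
--             ):
--                 return stripped.split()[0]
--     return "UnknownError"
-- ===== SOURCE B (Python) =====
-- def _classify(s):
--     """Return the exception-class string a qualifying stripped line yields, else None."""
--     if not s or any(s.startswith(p) for p in ("File ", " ", "~", "^", ".")):
--         return None
--     if "Error" not in s and "Exception" not in s:
--         return None
--     if ":" in s:
--         return s.split(":")[0].strip().split(".")[-1]
--     words = s.split()
--     if words and ("Error" in words[0] or "Exception" in words[0]):
--         return words[0]
--     return None
--
--
-- def _extract_exception_class(stderr: str) -> str:
--     found = None
--     for line in stderr.strip().splitlines():
--         c = _classify(line.strip())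
--         if c is not None:
--             found = c
--     return found if found is not None else "UnknownError"
-- ===== Notes on version B (the rewrite author's own statement) =====
-- stated objective: alternative
-- what changed: A scans the stripped lines in reverse and early-returns at the first qualifying line; B factors the per-line qualification/extraction into a classifier helper returning None-or-value and does one forward pass that overwrites an accumulator with each classification, returning the last one found (or 'UnknownError').
import Mathlib
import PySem

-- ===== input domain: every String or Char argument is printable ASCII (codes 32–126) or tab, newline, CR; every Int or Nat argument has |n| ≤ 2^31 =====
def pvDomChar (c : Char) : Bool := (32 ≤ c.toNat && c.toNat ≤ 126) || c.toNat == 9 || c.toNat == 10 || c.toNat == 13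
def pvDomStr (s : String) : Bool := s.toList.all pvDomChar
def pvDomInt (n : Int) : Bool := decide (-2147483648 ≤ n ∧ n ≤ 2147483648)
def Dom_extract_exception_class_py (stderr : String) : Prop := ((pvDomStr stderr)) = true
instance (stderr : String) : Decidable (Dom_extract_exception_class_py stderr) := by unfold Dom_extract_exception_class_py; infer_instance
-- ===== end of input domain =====

-- B replaces A's reversed scan with early return by a per-line classifier helper plus a
-- forward full scan that keeps the last classification (objective: simpler decomposition).

-- ===== PORT A =====
-- A's 'for line in reversed(lines)' with early returns, as structural recursion; 'continue' = recurse on the rest.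
def pyLoopA : List String → String
  | [] => "UnknownError"
  | line :: rest =>
    if PySem.Str.strip line = "" || PySem.Str.startswith (PySem.Str.strip line) "File "
        || PySem.Str.startswith (PySem.Str.strip line) " "
        || PySem.Str.startswith (PySem.Str.strip line) "~"
        || PySem.Str.startswith (PySem.Str.strip line) "^"
        || PySem.Str.startswith (PySem.Str.strip line) "." then
      pyLoopA rest
    else if PySem.Str.isIn "Error" (PySem.Str.strip line) || PySem.Str.isIn "Exception" (PySem.Str.strip line) then
      if PySem.Str.isIn ":" (PySem.Str.strip line) then
        -- stripped.split(":")[0].strip().split(".")[-1]; split? is 'some' since the separators are nonempty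
        ((PySem.Str.split? (PySem.Str.strip (((PySem.Str.split? (PySem.Str.strip line) ":").getD []).headD "")) ".").getD []).getLastD ""
      else
        if (!(PySem.Str.split₀ (PySem.Str.strip line)).isEmpty)
            && (PySem.Str.isIn "Error" ((PySem.Str.split₀ (PySem.Str.strip line)).headD "")
                || PySem.Str.isIn "Exception" ((PySem.Str.split₀ (PySem.Str.strip line)).headD "")) then
          (PySem.Str.split₀ (PySem.Str.strip line)).headD ""
        else
          pyLoopA rest
    else
      pyLoopA rest

def extract_exception_class_py (stderr : String) : String :=
  pyLoopA (PySem.Str.splitlines (PySem.Str.strip stderr)).reverse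

-- ===== PORT B =====
-- Source B's _classify: the exception-class string a qualifying stripped line yields, else none.
def pyClassifyB (s : String) : Option String :=
  if s = "" || (["File ", " ", "~", "^", "."].any fun p => PySem.Str.startswith s p) then
    none
  else if !PySem.Str.isIn "Error" s && !PySem.Str.isIn "Exception" s then
    none
  else if PySem.Str.isIn ":" s then
    some (((PySem.Str.split? (PySem.Str.strip (((PySem.Str.split? s ":").getD []).headD "")) ".").getD []).getLastD "")
  else
    if (!(PySem.Str.split₀ s).isEmpty)
        && (PySem.Str.isIn "Error" ((PySem.Str.split₀ s).headD "")
            || PySem.Str.isIn "Exception" ((PySem.Str.split₀ s).headD "")) then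
      some ((PySem.Str.split₀ s).headD "")
    else
      none

def extract_exception_class_py_alt (stderr : String) : String :=
  ((PySem.Str.splitlines (PySem.Str.strip stderr)).foldl
      (fun found line =>
        match pyClassifyB (PySem.Str.strip line) with
        | some c => some c
        | none => found)
      none).getD "UnknownError"

-- ===== PRECONDITION & SPEC =====
def Spec_extract_exception_class_py (stderr : String) (out : String) : Prop := out = extract_exception_class_py_alt stderr
instance (stderr : String) (out : String) : Decidable (Spec_extract_exception_class_py stderr out) := by unfold Spec_extract_exception_class_py; infer_instance

-- ===== CLAIM (what is proved, stated in full; the proofs are below) =====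
def Claim_equal_extract_exception_class_py : Prop := ∀ (stderr : String), Dom_extract_exception_class_py stderr → Spec_extract_exception_class_py stderr (extract_exception_class_py stderr)

-- ===== LEMMAS AND PROOFS =====

-- One step of A's loop is B's classification of the same line, with 'continue' read as none.
lemma loopA_step (line : String) (rest : List String) :
    pyLoopA (line :: rest) =
      match pyClassifyB (PySem.Str.strip line) with
      | some c => c
      | none => pyLoopA rest := by
  by_cases h0 : PySem.Str.strip line = ""
  · simp [pyLoopA, pyClassifyB, h0]
  · simp only [pyLoopA, pyClassifyB, List.any_cons, List.any_nil, Bool.or_false,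
      decide_eq_false h0, Bool.false_or]
    generalize pyLoopA rest = L
    generalize ((PySem.Str.split? (PySem.Str.strip (((PySem.Str.split? (PySem.Str.strip line) ":").getD []).headD "")) ".").getD []).getLastD "" = R
    generalize (!(PySem.Str.split₀ (PySem.Str.strip line)).isEmpty) = bE
    generalize (PySem.Str.split₀ (PySem.Str.strip line)).headD "" = W
    generalize (bE && (PySem.Str.isIn "Error" W || PySem.Str.isIn "Exception" W)) = BW
    generalize PySem.Str.isIn ":" (PySem.Str.strip line) = bcol
    generalize PySem.Str.isIn "Error" (PySem.Str.strip line) = be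
    generalize PySem.Str.isIn "Exception" (PySem.Str.strip line) = bx
    generalize PySem.Str.startswith (PySem.Str.strip line) "File " = b1
    generalize PySem.Str.startswith (PySem.Str.strip line) " " = b2
    generalize PySem.Str.startswith (PySem.Str.strip line) "~" = b3
    generalize PySem.Str.startswith (PySem.Str.strip line) "^" = b4
    generalize PySem.Str.startswith (PySem.Str.strip line) "." = b5
    cases b1 <;> cases b2 <;> cases b3 <;> cases b4 <;> cases b5 <;>
      cases be <;> cases bx <;> cases bcol <;> cases BW <;> rfl

-- A's whole reversed loop is 'first classification found in the reversed list, else UnknownError'.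
lemma pyLoopA_eq_findSome? : ∀ l : List String,
    pyLoopA l = (l.findSome? fun line => pyClassifyB (PySem.Str.strip line)).getD "UnknownError"
  | [] => rfl
  | x :: t => by
    rw [loopA_step]
    cases h : pyClassifyB (PySem.Str.strip x) <;>
      simp [h, pyLoopA_eq_findSome? t]

-- B's forward overwrite fold is the first classification found in the reversed list, else the accumulator.
lemma foldl_overwrite_eq_findSome?_reverse (xs : List String) (acc : Option String) :
    xs.foldl (fun found line =>
        match pyClassifyB (PySem.Str.strip line) with
        | some c => some c
        | none => found) acc =
      match xs.reverse.findSome? (fun line => pyClassifyB (PySem.Str.strip line)) with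
      | some v => some v
      | none => acc := by
  induction xs generalizing acc with
  | nil => rfl
  | cons x t ih =>
    rw [List.foldl_cons, ih, List.reverse_cons, List.findSome?_append]
    cases ht : t.reverse.findSome? (fun line => pyClassifyB (PySem.Str.strip line)) <;>
      cases hx : pyClassifyB (PySem.Str.strip x) <;>
        simp [hx]

-- ===== VERDICT (by name: the statement is the Claim_ definition above) =====
theorem extract_exception_class_py_spec : Claim_equal_extract_exception_class_py := by
  intro stderr _
  unfold Spec_extract_exception_class_py extract_exception_class_py extract_exception_class_py_alt
  rw [pyLoopA_eq_findSome?, foldl_overwrite_eq_findSome?_reverse]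
  cases h : (PySem.Str.splitlines (PySem.Str.strip stderr)).reverse.findSome?
      (fun line => pyClassifyB (PySem.Str.strip line)) <;> simp
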